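-- pv_equiv track=rewrite | github.com/Donny-GUI/python3-ps_tokenizer | ps_tokenizer.py | is_command_parameter
-- ===== SOURCE A (Python) =====
-- import unicodedata
--
-- def is_command_parameter(char_sequence:str):
--     invalid_chars = '{}();,|&.[\n '
--
--     def is_first_parameter_char(char):
--         if char in ['_', '?']:
--             return True
--         category = unicodedata.category(char)
--         return category in ['Lu', 'Ll', 'Lt', 'Lm', 'Lo']
--
--     def is_parameter_char(char):
--         if char in invalid_chars or char == ':' or char.isspace():
--             return False
--         return True
--
--     if not char_sequence.startswith('-'):
--         return False
--
--     pos = 1  # Skip the dash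
--     length = len(char_sequence)
--
--     # Check for first-parameter-char
--     if pos >= length or not is_first_parameter_char(char_sequence[pos]):
--         return False
--     pos += 1
--
--     # Check for subsequent parameter-chars
--     while pos < length and is_parameter_char(char_sequence[pos]):
--         pos += 1
--
--     # Check if there's an optional colon at the end
--     if pos < length and char_sequence[pos] == ':':
--         pos += 1
--
--     # If we've consumed all the characters, it's valid
--     return pos == length
-- ===== SOURCE B (Python) =====
-- def is_command_parameter(char_sequence: str):
--     invalid_chars = '{}();,|&.[\n '
--
--     def is_first_parameter_char(char):
--         if char in ['_', '?']:
--             return True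
--         import unicodedata
--         return unicodedata.category(char) in ['Lu', 'Ll', 'Lt', 'Lm', 'Lo']
--
--     def is_parameter_char(char):
--         return not (char in invalid_chars or char == ':' or char.isspace())
--
--     if not char_sequence.startswith('-'):
--         return False
--     body = char_sequence[1:]
--     if body.endswith(':'):
--         body = body[:-1]
--     if not body:
--         return False
--     return is_first_parameter_char(body[0]) and all(is_parameter_char(c) for c in body[1:])
-- ===== Notes on version B (the rewrite author's own statement) =====
-- stated objective: simpler
-- what changed: Replaces the pos-pointer forward scan with its post-loop optional-colon check by normalize-then-validate: strip one trailing ':' from the body after '-', then check the first character and all remaining characters with the same predicates.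
import Mathlib
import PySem

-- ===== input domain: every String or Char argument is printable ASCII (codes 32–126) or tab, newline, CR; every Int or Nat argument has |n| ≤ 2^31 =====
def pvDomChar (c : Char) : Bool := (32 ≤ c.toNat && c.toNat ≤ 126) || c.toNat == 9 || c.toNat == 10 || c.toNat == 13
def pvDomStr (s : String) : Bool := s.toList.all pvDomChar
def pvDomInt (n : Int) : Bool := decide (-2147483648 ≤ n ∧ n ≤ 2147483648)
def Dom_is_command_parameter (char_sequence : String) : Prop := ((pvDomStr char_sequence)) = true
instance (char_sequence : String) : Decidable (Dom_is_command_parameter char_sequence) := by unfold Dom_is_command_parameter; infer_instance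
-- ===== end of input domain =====

-- B validates the '-'-stripped body after removing one optional trailing ':' instead of A's
-- pos-pointer scan with a post-loop colon check; same character predicates, simpler decomposition.

-- ===== PORT A =====
-- invalid_chars = '{}();,|&.[\n '
def aInvalidChars : List Char := ['{', '}', '(', ')', ';', ',', '|', '&', '.', '[', '\n', ' ']

-- unicodedata.category(char) ∈ ['Lu','Ll','Lt','Lm','Lo'] is exactly Char.isAlpha on the
-- printable-ASCII + tab/newline/CR domain.
def aIsFirstParamChar (c : Char) : Bool :=
  if c = '_' ∨ c = '?' then true
  else c.isAlpha

-- char.isspace() is exactly Char.isWhitespace on the ASCII domain (space, tab, \n, \r).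
def aIsParamChar (c : Char) : Bool :=
  if c ∈ aInvalidChars ∨ c = ':' ∨ c.isWhitespace then false else true

-- the while loop: advance pos while is_parameter_char; the remaining suffix is returned
def aScan : List Char → List Char
  | [] => []
  | c :: t => if aIsParamChar c then aScan t else c :: t

-- A's post-loop lines on the leftover suffix: optional ':' then pos == length
def aTail (r : List Char) : Bool :=
  match r with
  | [] => true
  | d :: rr => if d = ':' then rr.isEmpty else false

def is_command_parameter (char_sequence : String) : Bool :=
  match char_sequence.toList with
  | [] => false                                    -- '' does not start with '-'
  | c0 :: rest =>
    if c0 ≠ '-' then false                         -- not char_sequence.startswith('-')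
    else
      match rest with                              -- pos = 1
      | [] => false                                -- pos >= length
      | c :: t =>
        if ¬ aIsFirstParamChar c then false
        else aTail (aScan t)                     -- while loop, optional colon, pos == length

-- ===== PORT B =====
def bIsFirstParamChar (c : Char) : Bool :=
  if c = '_' ∨ c = '?' then true
  else c.isAlpha

def bIsParamChar (c : Char) : Bool :=
  !(c ∈ aInvalidChars ∨ c = ':' ∨ c.isWhitespace)

-- body.endswith(':') → body = body[:-1]
def bStrip (l : List Char) : List Char :=
  if l.getLast? = some ':' then l.dropLast else l

def is_command_parameter_alt (char_sequence : String) : Bool :=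
  match char_sequence.toList with
  | [] => false
  | c0 :: body0 =>
    if c0 ≠ '-' then false
    else
      match bStrip body0 with
      | [] => false
      | c :: rest => bIsFirstParamChar c && rest.all bIsParamChar

-- ===== PRECONDITION & SPEC =====
def Spec_is_command_parameter (char_sequence : String) (out : Bool) : Prop := out = is_command_parameter_alt char_sequence
instance (char_sequence : String) (out : Bool) : Decidable (Spec_is_command_parameter char_sequence out) := by unfold Spec_is_command_parameter; infer_instance

-- ===== CLAIM (what is proved, stated in full; the proofs are below) =====
def Claim_equal_is_command_parameter : Prop := ∀ (char_sequence : String), Dom_is_command_parameter char_sequence → Spec_is_command_parameter char_sequence (is_command_parameter char_sequence)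

-- ===== LEMMAS AND PROOFS =====

lemma bParam_eq_aParam (c : Char) : bIsParamChar c = aIsParamChar c := by
  simp [bIsParamChar, aIsParamChar]

lemma aParam_colon_false : aIsParamChar ':' = false := by decide

lemma aParam_ne_colon {c : Char} (hc : aIsParamChar c = true) : c ≠ ':' := by
  intro h; rw [h, aParam_colon_false] at hc; exact Bool.false_ne_true hc

lemma bStrip_cons₂ (c d : Char) (u : List Char) :
    bStrip (c :: d :: u) = c :: bStrip (d :: u) := by
  unfold bStrip
  rw [show (c :: d :: u).getLast? = (d :: u).getLast? from by simp [List.getLast?_cons]]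
  split_ifs with h
  · simp
  · rfl

lemma bStrip_singleton {c : Char} (h : c ≠ ':') : bStrip [c] = [c] := by
  unfold bStrip; simp [h]

-- core invariant: A's post-loop test on the loop's leftover suffix equals
-- "all parameter chars after stripping one trailing colon" on the whole tail
lemma bParam_fun : bIsParamChar = aIsParamChar := funext bParam_eq_aParam

lemma scan_eq_strip_all (l : List Char) :
    aTail (aScan l) = (bStrip l).all aIsParamChar := by
  induction l with
  | nil => simp [aScan, aTail, bStrip]
  | cons c t ih =>
    by_cases hc : aIsParamChar c = true
    · cases t with
      | nil => simp [aScan, aTail, hc, bStrip_singleton (aParam_ne_colon hc)]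
      | cons d u =>
        rw [bStrip_cons₂, List.all_cons, hc, Bool.true_and, ← ih]
        simp only [aScan, hc, if_true]
    · have hscan : aScan (c :: t) = c :: t := by simp [aScan, hc]
      rw [hscan]
      by_cases hcol : c = ':'
      · subst hcol
        cases t with
        | nil => simp [aTail, bStrip]
        | cons d u => rw [bStrip_cons₂]; simp [aTail, aParam_colon_false]
      · cases t with
        | nil => rw [bStrip_singleton hcol]; simp [aTail, hcol, hc]
        | cons d u => rw [bStrip_cons₂]; simp [aTail, hcol, hc]

-- ===== VERDICT (by name: the statement is the Claim_ definition above) =====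
theorem is_command_parameter_spec : Claim_equal_is_command_parameter := by
  intro s _
  unfold Spec_is_command_parameter is_command_parameter is_command_parameter_alt
  cases hls : s.toList with
  | nil => rfl
  | cons c0 body0 =>
    by_cases hdash : c0 = '-'
    · subst hdash
      have hbf : bIsFirstParamChar = aIsFirstParamChar := rfl
      cases body0 with
      | nil => simp [bStrip]
      | cons c t =>
        cases t with
        | nil =>
          by_cases hcol : c = ':'
          · subst hcol
            simp [bStrip, show aIsFirstParamChar ':' = false from by decide]
          · cases haf : aIsFirstParamChar c <;>
              simp [bStrip_singleton hcol, aScan, aTail, haf, hbf]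
        | cons d u =>
          cases haf : aIsFirstParamChar c with
          | false => simp [haf, hbf, bStrip_cons₂]
          | true => simp [haf, hbf, bParam_fun, bStrip_cons₂, scan_eq_strip_all (d :: u)]
    · simp [hdash]
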